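-- pv_equiv track=rewrite | github.com/ZouWang-spider/EI-ASQP | EI_ASQP/BaseModel/CGNN_Element.py | extract_quad_positions
-- ===== SOURCE A (Python) =====
-- def extract_quad_positions(target_text):
--     # 按空格拆分为 token
--     tokens = target_text.split()
--     # 记录结果
--     quads = []
--     # 每个四元组用这个字典保存
--     current_quad = {}
--
--     idx = 0
--     while idx < len(tokens):
--         token = tokens[idx]
--
--         if token == '[A]':
--             start = idx + 1
--             # 找到下一个标签前的位置
--             end = start
--             while end < len(tokens) and not tokens[end].startswith('['):
--                 end += 1
--             current_quad['A'] = (start, end - 1)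
--             idx = end
--             continue
--
--         elif token == '[O]':
--             start = idx + 1
--             end = start
--             while end < len(tokens) and not tokens[end].startswith('['):
--                 end += 1
--             current_quad['O'] = (start, end - 1)
--             idx = end
--             continue
--
--         elif token == '[C]':
--             start = idx + 1
--             end = start
--             while end < len(tokens) and not tokens[end].startswith('['):
--                 end += 1
--             current_quad['C'] = (start, end - 1)
--             idx = end
--             continue
--
--         elif token == '[S]':
--             start = idx + 1
--             end = start
--             while end < len(tokens) and not tokens[end].startswith('['):
--                 end += 1
--             current_quad['S'] = (start, end - 1)
--             idx = end
--             continue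
--
--         elif token == '[SSEP]':
--             # 遇到分割符，当前四元组存入结果
--             if current_quad:
--                 quads.append(current_quad)
--             current_quad = {}
--             idx += 1
--             continue
--
--         else:
--             idx += 1
--
--     # 处理最后一个四元组
--     if current_quad:
--         quads.append(current_quad)
--
--     return tokens, quads
-- ===== SOURCE B (Python) =====
-- _TAG = {'[A]': 'A', '[O]': 'O', '[C]': 'C', '[S]': 'S'}
--
-- def extract_quad_positions(target_text):
--     tokens = target_text.split()
--     quads = []
--     current_quad = {}
--     open_span = None  # (key, start) of the span currently being read
--     for i, tok in enumerate(tokens):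
--         if tok.startswith('['):
--             # any boundary token closes the span opened by the previous tag
--             if open_span is not None:
--                 k, s = open_span
--                 current_quad[k] = (s, i - 1)
--                 open_span = None
--             key = _TAG.get(tok)
--             if key is not None:
--                 open_span = (key, i + 1)
--             elif tok == '[SSEP]':
--                 if current_quad:
--                     quads.append(current_quad)
--                 current_quad = {}
--     if open_span is not None:
--         k, s = open_span
--         current_quad[k] = (s, len(tokens) - 1)
--     if current_quad:
--         quads.append(current_quad)
--     return tokens, quads
-- ===== Notes on version B (the rewrite author's own statement) =====
-- stated objective: simpler
-- what changed: Replaced the index-jumping outer while loop with nested inner scans by a single linear for-loop over enumerate(tokens) that keeps one open span (key, start) as state and closes it at the next '['-boundary or at end of input.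
import Mathlib
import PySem

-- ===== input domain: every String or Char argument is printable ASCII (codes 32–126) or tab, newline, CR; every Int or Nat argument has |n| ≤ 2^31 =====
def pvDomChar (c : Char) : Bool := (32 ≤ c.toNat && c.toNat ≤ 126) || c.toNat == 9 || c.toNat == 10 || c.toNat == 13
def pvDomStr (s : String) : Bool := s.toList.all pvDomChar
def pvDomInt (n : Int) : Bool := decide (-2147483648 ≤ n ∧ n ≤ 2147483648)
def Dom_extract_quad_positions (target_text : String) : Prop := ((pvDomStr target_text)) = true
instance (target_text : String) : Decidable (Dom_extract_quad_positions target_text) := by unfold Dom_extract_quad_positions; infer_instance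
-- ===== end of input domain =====

-- B replaces A's index-jumping while loop (with an inner scan per tag) by one linear pass over
-- enumerate(tokens) carrying an open-span (key, start) as state; same values, simpler control flow.

-- ===== PORT A =====
-- inner 'while end < len(tokens) and not tokens[end].startswith("["): end += 1'
def pvFindEnd (tokens : List String) (e : Nat) : Nat :=
  if h : e < tokens.length then
    if PySem.Str.startswith tokens[e] "[" then e else pvFindEnd tokens (e + 1)
  else e
termination_by tokens.length - e

-- needed by pvLoopA's termination: the inner scan never moves backwards
lemma pvFindEnd_ge (tokens : List String) (b : Nat) : b ≤ pvFindEnd tokens b := by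
  fun_induction pvFindEnd tokens b <;> omega

def pvLoopA (tokens : List String) (idx : Nat)
    (cur : PySem.Dict String (Int × Int)) (quads : List (List (String × Int × Int))) :
    List (List (String × Int × Int)) :=
  if h : idx < tokens.length then
    if tokens[idx] = "[A]" then
      pvLoopA tokens (pvFindEnd tokens (idx + 1))
        (cur.insert "A" ((idx : Int) + 1, (pvFindEnd tokens (idx + 1) : Int) - 1)) quads
    else if tokens[idx] = "[O]" then
      pvLoopA tokens (pvFindEnd tokens (idx + 1))
        (cur.insert "O" ((idx : Int) + 1, (pvFindEnd tokens (idx + 1) : Int) - 1)) quads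
    else if tokens[idx] = "[C]" then
      pvLoopA tokens (pvFindEnd tokens (idx + 1))
        (cur.insert "C" ((idx : Int) + 1, (pvFindEnd tokens (idx + 1) : Int) - 1)) quads
    else if tokens[idx] = "[S]" then
      pvLoopA tokens (pvFindEnd tokens (idx + 1))
        (cur.insert "S" ((idx : Int) + 1, (pvFindEnd tokens (idx + 1) : Int) - 1)) quads
    else if tokens[idx] = "[SSEP]" then
      pvLoopA tokens (idx + 1) PySem.Dict.empty
        (if cur.items = [] then quads else quads ++ [cur.items])
    else
      pvLoopA tokens (idx + 1) cur quads
  else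
    if cur.items = [] then quads else quads ++ [cur.items]
termination_by tokens.length - idx
decreasing_by
  · have := pvFindEnd_ge tokens (idx + 1); omega
  · have := pvFindEnd_ge tokens (idx + 1); omega
  · have := pvFindEnd_ge tokens (idx + 1); omega
  · have := pvFindEnd_ge tokens (idx + 1); omega
  · omega
  · omega

def extract_quad_positions (target_text : String) : List String × (List (List (String × Int × Int))) :=
  let tokens := PySem.Str.split₀ target_text
  (tokens, pvLoopA tokens 0 PySem.Dict.empty [])

-- ===== PORT B =====
-- _TAG.get(tok)
def pvTagKey? (tok : String) : Option String :=
  if tok = "[A]" then some "A"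
  else if tok = "[O]" then some "O"
  else if tok = "[C]" then some "C"
  else if tok = "[S]" then some "S"
  else none

-- state: (open_span, current_quad, quads)
abbrev pvStateB : Type :=
  Option (String × Int) × PySem.Dict String (Int × Int) × List (List (String × Int × Int))

def pvStepB (st : pvStateB) (p : Int × String) : pvStateB :=
  let (op, cur, quads) := st
  let (i, tok) := p
  if PySem.Str.startswith tok "[" then
    let cur := match op with
      | some (k, s) => cur.insert k (s, i - 1)
      | none => cur
    match pvTagKey? tok with
    | some key => (some (key, i + 1), cur, quads)
    | none =>
      if tok = "[SSEP]" then
        (none, PySem.Dict.empty, if cur.items = [] then quads else quads ++ [cur.items])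
      else (none, cur, quads)
  else st

def extract_quad_positions_alt (target_text : String) : List String × (List (List (String × Int × Int))) :=
  let tokens := PySem.Str.split₀ target_text
  let st := (PySem.List.enumerate tokens 0).foldl pvStepB (none, PySem.Dict.empty, [])
  let cur := match st.1 with
    | some (k, s) => st.2.1.insert k (s, (tokens.length : Int) - 1)
    | none => st.2.1
  (tokens, if cur.items = [] then st.2.2 else st.2.2 ++ [cur.items])

-- ===== PRECONDITION & SPEC =====
def Spec_extract_quad_positions (target_text : String) (out : List String × (List (List (String × Int × Int)))) : Prop := out = extract_quad_positions_alt target_text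
instance (target_text : String) (out : List String × (List (List (String × Int × Int)))) : Decidable (Spec_extract_quad_positions target_text out) := by unfold Spec_extract_quad_positions; infer_instance

-- ===== CLAIM (what is proved, stated in full; the proofs are below) =====
def Claim_equal_extract_quad_positions : Prop := ∀ (target_text : String), Dom_extract_quad_positions target_text → Spec_extract_quad_positions target_text (extract_quad_positions target_text)

-- ===== LEMMAS AND PROOFS =====

-- B's end-of-input finalisation applied to a fold state
def pvFinishB (tokens : List String) (st : pvStateB) : List (List (String × Int × Int)) :=
  let cur := match st.1 with
    | some (k, s) => st.2.1.insert k (s, (tokens.length : Int) - 1)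
    | none => st.2.1
  if cur.items = [] then st.2.2 else st.2.2 ++ [cur.items]

lemma pvFindEnd_le (tokens : List String) (b : Nat) (hb : b ≤ tokens.length) :
    pvFindEnd tokens b ≤ tokens.length := by
  fun_induction pvFindEnd tokens b <;> omega

lemma pvFindEnd_startswith (tokens : List String) (b : Nat) :
    pvFindEnd tokens b < tokens.length →
      PySem.Str.startswith (tokens.getD (pvFindEnd tokens b) "") "[" = true := by
  fun_induction pvFindEnd tokens b with
  | case1 e h hsw => intro _; rwa [List.getD_eq_getElem tokens "" h]
  | case2 e h hsw ih => exact ih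
  | case3 e h => intro hlt; omega

lemma pvStepB_nonbracket (st : pvStateB) (i : Int) (tok : String)
    (h : PySem.Str.startswith tok "[" = false) : pvStepB st (i, tok) = st := by
  obtain ⟨op, cur, quads⟩ := st
  have h' : PySem.Chars.startswith tok.toList ['['] = false := by simpa using h
  simp [pvStepB, h']

-- skipping the non-'[' tokens between a tag and the next boundary leaves the state unchanged
lemma pvFold_skip (tokens : List String) (K : String) (s0 : Int)
    (cur : PySem.Dict String (Int × Int)) (quads : List (List (String × Int × Int))) :
    ∀ b, (PySem.List.enumerate (tokens.drop b) b).foldl pvStepB (some (K, s0), cur, quads)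
      = (PySem.List.enumerate (tokens.drop (pvFindEnd tokens b)) (pvFindEnd tokens b)).foldl
          pvStepB (some (K, s0), cur, quads) := by
  intro b
  fun_induction pvFindEnd tokens b with
  | case1 e h hsw => rfl
  | case2 e h hsw ih =>
    rw [List.drop_eq_getElem_cons h, PySem.List.enumerate_cons, List.foldl_cons,
      pvStepB_nonbracket _ _ _ (by simpa using hsw)]
    simpa using ih
  | case3 e h => rfl

-- closing a span at a boundary token commutes with the step at that token
lemma pvStepB_close (K : String) (s0 : Int) (cur : PySem.Dict String (Int × Int))
    (quads : List (List (String × Int × Int))) (i : Int) (tok : String)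
    (h : PySem.Str.startswith tok "[" = true) :
    pvStepB (some (K, s0), cur, quads) (i, tok)
      = pvStepB (none, cur.insert K (s0, i - 1), quads) (i, tok) := by
  have h' : PySem.Chars.startswith tok.toList ['['] = true := by simpa using h
  simp [pvStepB, h']

-- a token that is none of the five boundary kinds leaves a closed state unchanged
lemma pvStepB_other (cur : PySem.Dict String (Int × Int))
    (quads : List (List (String × Int × Int))) (i : Int) (tok : String)
    (hkey : pvTagKey? tok = none) (hs : tok ≠ "[SSEP]") :
    pvStepB (none, cur, quads) (i, tok) = (none, cur, quads) := by
  by_cases h : PySem.Str.startswith tok "[" = true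
  · have h' : PySem.Chars.startswith tok.toList ['['] = true := by simpa using h
    simp [pvStepB, h', hkey, hs]
  · exact pvStepB_nonbracket _ _ _ (by simpa using h)

-- one tag step of A equals the corresponding stretch of B's fold (given the induction hypothesis)
lemma pvTagCase (tokens : List String) (n idx : Nat)
    (cur : PySem.Dict String (Int × Int)) (quads : List (List (String × Int × Int)))
    (h : idx < tokens.length) (K : String)
    (hkey : pvTagKey? tokens[idx] = some K)
    (hsw : PySem.Chars.startswith (tokens[idx]).toList ['['] = true)
    (hn : tokens.length - idx ≤ n + 1)
    (ih : ∀ (idx : Nat) (cur : PySem.Dict String (Int × Int))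
        (quads : List (List (String × Int × Int))), tokens.length - idx ≤ n →
        pvLoopA tokens idx cur quads
          = pvFinishB tokens ((PySem.List.enumerate (tokens.drop idx) (idx : Int)).foldl pvStepB
              (none, cur, quads))) :
    pvLoopA tokens (pvFindEnd tokens (idx + 1))
        (cur.insert K ((idx : Int) + 1, (pvFindEnd tokens (idx + 1) : Int) - 1)) quads
      = pvFinishB tokens ((PySem.List.enumerate (tokens.drop idx) (idx : Int)).foldl pvStepB
          (none, cur, quads)) := by
  rw [List.drop_eq_getElem_cons h, PySem.List.enumerate_cons, List.foldl_cons]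
  have hstep : pvStepB (none, cur, quads) ((idx : Int), tokens[idx])
      = (some (K, (idx : Int) + 1), cur, quads) := by
    simp [pvStepB, hsw, hkey]
  rw [hstep]
  have hskip := pvFold_skip tokens K ((idx : Int) + 1) cur quads (idx + 1)
  push_cast at hskip
  rw [hskip]
  have hge := pvFindEnd_ge tokens (idx + 1)
  have hle := pvFindEnd_le tokens (idx + 1) (by omega)
  by_cases hlt : pvFindEnd tokens (idx + 1) < tokens.length
  · have hsw2 := pvFindEnd_startswith tokens (idx + 1) hlt
    rw [List.getD_eq_getElem tokens "" hlt] at hsw2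
    rw [ih (pvFindEnd tokens (idx + 1))
      (cur.insert K ((idx : Int) + 1, (pvFindEnd tokens (idx + 1) : Int) - 1)) quads (by omega)]
    rw [List.drop_eq_getElem_cons hlt]
    simp only [PySem.List.enumerate_cons, List.foldl_cons]
    rw [pvStepB_close K ((idx : Int) + 1) cur quads _ _ hsw2]
  · have heq : pvFindEnd tokens (idx + 1) = tokens.length := by omega
    rw [heq, List.drop_length, PySem.List.enumerate_nil, List.foldl_nil,
      pvLoopA, dif_neg (by omega)]
    simp [pvFinishB]
-- main invariant: A's loop from idx equals B's fold over the remaining enumerated tokens, finalised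
lemma pvMain (tokens : List String) : ∀ n idx cur quads, tokens.length - idx ≤ n →
    pvLoopA tokens idx cur quads
      = pvFinishB tokens ((PySem.List.enumerate (tokens.drop idx) (idx : Int)).foldl pvStepB
          (none, cur, quads)) := by
  intro n
  induction n with
  | zero =>
    intro idx cur quads hn
    rw [pvLoopA, dif_neg (by omega), List.drop_eq_nil_of_le (by omega)]
    rfl
  | succ n ih =>
    intro idx cur quads hn
    by_cases h : idx < tokens.length
    · by_cases hA : tokens[idx] = "[A]"
      · rw [pvLoopA, dif_pos h, if_pos hA]
        exact pvTagCase tokens n idx cur quads h "A" (by rw [hA]; rfl) (by rw [hA]; decide) hn ih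
      · by_cases hO : tokens[idx] = "[O]"
        · rw [pvLoopA, dif_pos h, if_neg hA, if_pos hO]
          exact pvTagCase tokens n idx cur quads h "O" (by rw [hO]; rfl) (by rw [hO]; decide) hn ih
        · by_cases hC : tokens[idx] = "[C]"
          · rw [pvLoopA, dif_pos h, if_neg hA, if_neg hO, if_pos hC]
            exact pvTagCase tokens n idx cur quads h "C" (by rw [hC]; rfl) (by rw [hC]; decide) hn ih
          · by_cases hS : tokens[idx] = "[S]"
            · rw [pvLoopA, dif_pos h, if_neg hA, if_neg hO, if_neg hC, if_pos hS]
              exact pvTagCase tokens n idx cur quads h "S" (by rw [hS]; rfl) (by rw [hS]; decide) hn ih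
            · rw [List.drop_eq_getElem_cons h, PySem.List.enumerate_cons, List.foldl_cons]
              by_cases hP : tokens[idx] = "[SSEP]"
              · rw [pvLoopA, dif_pos h, if_neg hA, if_neg hO, if_neg hC, if_neg hS, if_pos hP]
                have hstep : pvStepB (none, cur, quads) ((idx : Int), tokens[idx])
                    = (none, PySem.Dict.empty,
                        if cur.items = [] then quads else quads ++ [cur.items]) := by
                  rw [hP]
                  simp [pvStepB, pvTagKey?]
                  intro hf
                  exact absurd hf (by decide)
                rw [hstep]
                have := ih (idx + 1) PySem.Dict.empty
                  (if cur.items = [] then quads else quads ++ [cur.items]) (by omega)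
                push_cast at this
                exact this
              · rw [pvLoopA, dif_pos h, if_neg hA, if_neg hO, if_neg hC, if_neg hS, if_neg hP]
                have hkey : pvTagKey? tokens[idx] = none := by
                  simp [pvTagKey?, hA, hO, hC, hS]
                rw [pvStepB_other cur quads _ _ hkey hP]
                have := ih (idx + 1) cur quads (by omega)
                push_cast at this
                exact this
    · rw [pvLoopA, dif_neg h, List.drop_eq_nil_of_le (by omega)]
      rfl

-- ===== VERDICT (by name: the statement is the Claim_ definition above) =====
theorem extract_quad_positions_spec : Claim_equal_extract_quad_positions := by
  intro t _
  unfold Spec_extract_quad_positions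
  show (PySem.Str.split₀ t, pvLoopA (PySem.Str.split₀ t) 0 PySem.Dict.empty []) =
    (PySem.Str.split₀ t,
      pvFinishB (PySem.Str.split₀ t)
        ((PySem.List.enumerate (PySem.Str.split₀ t) 0).foldl pvStepB (none, PySem.Dict.empty, [])))
  have hmain := pvMain (PySem.Str.split₀ t) (PySem.Str.split₀ t).length 0 PySem.Dict.empty [] (by omega)
  simp only [List.drop_zero, Nat.cast_zero] at hmain
  rw [hmain]
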